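-- pv_equiv track=rewrite | github.com/sahilrajput280/meriAwaaz | api/services/configuration/masking.py | resolve_masked_api_keys
-- ===== SOURCE A (Python) =====
-- VISIBLE_CHARS = 4  # number of trailing characters to reveal
--
-- MASK_CHAR = "*"
--
-- def mask_key(real_key: str, visible: int = VISIBLE_CHARS) -> str:
--     """Return a masked representation of *real_key*.
--
--     Example:
--         >>> mask_key("sk-1234567890abcdef")
--         '****************cdef'
--     """
--     if real_key is None:
--         return ""
--
--     if visible <= 0 or visible >= len(real_key):
--         # mask entire key or nothing to mask – edge-cases
--         return MASK_CHAR * len(real_key)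
--
--     masked_part = MASK_CHAR * (len(real_key) - visible)
--     return f"{masked_part}{real_key[-visible:]}"
--
-- def is_mask_of(masked: str, real_key: str) -> bool:
--     """Return *True* if *masked* equals the mask of *real_key* under the current rules."""
--     return mask_key(real_key) == masked
--
-- def resolve_masked_api_keys(
--     incoming: str | list[str], existing: str | list[str]
-- ) -> str | list[str]:
--     """Resolve masked API keys against existing real keys.
--
--     For each incoming key, if it matches the mask of an existing key, the real
--     key is restored.  New (unmasked) keys are kept as-is.  This handles adds,
--     removes, reorders, and partial replacements correctly.
--     """
--     if isinstance(incoming, str) and isinstance(existing, str):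
--         return existing if is_mask_of(incoming, existing) else incoming
--
--     existing_list = existing if isinstance(existing, list) else [existing]
--     incoming_list = incoming if isinstance(incoming, list) else [incoming]
--
--     resolved: list[str] = []
--     used: set[int] = set()
--     for key in incoming_list:
--         matched = False
--         for i, real in enumerate(existing_list):
--             if i not in used and is_mask_of(key, real):
--                 resolved.append(real)
--                 used.add(i)
--                 matched = True
--                 break
--         if not matched:
--             resolved.append(key)
--     return resolved
-- ===== SOURCE B (Python) =====
-- VISIBLE_CHARS = 4
-- MASK_CHAR = "*"
--
--
-- def mask_key(real_key: str, visible: int = VISIBLE_CHARS) -> str: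
--     if real_key is None:
--         return ""
--     if visible <= 0 or visible >= len(real_key):
--         return MASK_CHAR * len(real_key)
--     masked_part = MASK_CHAR * (len(real_key) - visible)
--     return f"{masked_part}{real_key[-visible:]}"
--
--
-- def resolve_masked_api_keys(incoming, existing):
--     if isinstance(incoming, str) and isinstance(existing, str):
--         return existing if mask_key(existing) == incoming else incoming
--
--     existing_list = existing if isinstance(existing, list) else [existing]
--     incoming_list = incoming if isinstance(incoming, list) else [incoming]
--
--     # index every existing key by its mask, keeping original order per mask
--     queues = {}
--     for real in existing_list:
--         queues.setdefault(mask_key(real), []).append(real)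
--
--     resolved = []
--     for key in incoming_list:
--         q = queues.get(key)
--         if q:
--             resolved.append(q.pop(0))
--         else:
--             resolved.append(key)
--     return resolved
-- ===== Notes on version B (the rewrite author's own statement) =====
-- stated objective: faster
-- what changed: A rescans the whole existing list (skipping used indices) for every incoming key; B builds a mask->queue dict over existing once and answers each incoming key by popping the front of its queue.
import Mathlib
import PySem

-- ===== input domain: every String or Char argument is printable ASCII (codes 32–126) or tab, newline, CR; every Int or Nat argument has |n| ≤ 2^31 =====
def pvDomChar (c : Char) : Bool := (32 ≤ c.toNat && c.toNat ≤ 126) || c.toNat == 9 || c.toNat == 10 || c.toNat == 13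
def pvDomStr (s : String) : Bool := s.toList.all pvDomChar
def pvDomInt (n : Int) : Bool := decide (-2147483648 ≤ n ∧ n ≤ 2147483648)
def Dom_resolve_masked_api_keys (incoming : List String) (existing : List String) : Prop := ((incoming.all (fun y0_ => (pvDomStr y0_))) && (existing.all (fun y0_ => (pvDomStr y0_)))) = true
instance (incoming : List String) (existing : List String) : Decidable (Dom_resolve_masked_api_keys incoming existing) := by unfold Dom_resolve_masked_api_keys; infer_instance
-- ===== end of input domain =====

-- B replaces A's per-incoming linear scan over `existing` by a mask→queue index built once
-- (objective: faster — one pass over each list instead of a nested scan).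

-- ===== PORT A =====
-- mask_key(real_key, visible) (the `real_key is None` branch is unreachable for String inputs)
def maskKey (real_key : String) (visible : Int) : String :=
  if visible ≤ 0 ∨ PySem.Str.len real_key ≤ visible then
    String.ofList (List.replicate (PySem.Str.len real_key).toNat '*')
  else
    String.ofList (List.replicate (PySem.Str.len real_key - visible).toNat '*' ++
      PySem.List.slice real_key.toList (some (-visible)) none)

-- is_mask_of(masked, real_key)
def isMaskOf (masked : String) (real_key : String) : Bool := maskKey real_key 4 == masked

-- the body of A's outer loop: the inner `for i, real in enumerate(...)` with break = List.find?
def resolveStepA (existing : List String) (st : List String × PySem.Set Int) (key : String) :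
    List String × PySem.Set Int :=
  match (PySem.List.enumerate existing).find?
      (fun p => !(PySem.Set.contains st.2 p.1) && isMaskOf key p.2) with
  | some (i, real) => (st.1 ++ [real], PySem.Set.add st.2 i)
  | none => (st.1 ++ [key], st.2)

def resolve_masked_api_keys (incoming : List String) (existing : List String) : List String :=
  (incoming.foldl (resolveStepA existing) ([], PySem.Set.empty)).1

-- ===== PORT B =====
-- queues.setdefault(mask_key(real), []).append(real)
def buildQueues (existing : List String) : PySem.Dict String (List String) :=
  existing.foldl (fun d real => d.modify (maskKey real 4) [] (fun q => q ++ [real])) PySem.Dict.empty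

-- q = queues.get(key); if q: resolved.append(q.pop(0)) else: resolved.append(key)
def resolveStepB (st : List String × PySem.Dict String (List String)) (key : String) :
    List String × PySem.Dict String (List String) :=
  match st.2.get? key with
  | some (r :: rs) => (st.1 ++ [r], st.2.insert key rs)
  | _ => (st.1 ++ [key], st.2)

def resolve_masked_api_keys_alt (incoming : List String) (existing : List String) : List String :=
  (incoming.foldl resolveStepB ([], buildQueues existing)).1

-- ===== PRECONDITION & SPEC =====
def Spec_resolve_masked_api_keys (incoming : List String) (existing : List String) (out : List String) : Prop := out = resolve_masked_api_keys_alt incoming existing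
instance (incoming : List String) (existing : List String) (out : List String) : Decidable (Spec_resolve_masked_api_keys incoming existing out) := by unfold Spec_resolve_masked_api_keys; infer_instance

-- ===== CLAIM (what is proved, stated in full; the proofs are below) =====
def Claim_equal_resolve_masked_api_keys : Prop := ∀ (incoming : List String) (existing : List String), Dom_resolve_masked_api_keys incoming existing → Spec_resolve_masked_api_keys incoming existing (resolve_masked_api_keys incoming existing)

-- ===== LEMMAS AND PROOFS =====

-- the queue of still-unused existing keys whose mask is m, in index order
def remP (pairs : List (Int × String)) (used : PySem.Set Int) (m : String) : List String :=
  pairs.filterMap (fun p => if !(PySem.Set.contains used p.1) && isMaskOf m p.2 then some p.2 else none)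

lemma contains_add_of_ne {x y : Int} (s : PySem.Set Int) (h : y ≠ x) :
    PySem.Set.contains (PySem.Set.add s x) y = PySem.Set.contains s y := by
  simp [PySem.Set.contains_eq_listContains, List.contains_eq_mem, PySem.Set.mem_add, h]

lemma remP_congr (pairs : List (Int × String)) (used used' : PySem.Set Int) (m : String)
    (h : ∀ p ∈ pairs, PySem.Set.contains used p.1 = PySem.Set.contains used' p.1) :
    remP pairs used m = remP pairs used' m := by
  unfold remP
  exact List.filterMap_congr (by intro p hp; rw [h p hp])

lemma remP_cons_true {j : Int} {s : String} {rest : List (Int × String)}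
    {used : PySem.Set Int} {m : String}
    (h : (!(PySem.Set.contains used j) && isMaskOf m s) = true) :
    remP ((j, s) :: rest) used m = s :: remP rest used m := by
  simp only [remP, List.filterMap_cons, h]
  simp

lemma remP_cons_false {j : Int} {s : String} {rest : List (Int × String)}
    {used : PySem.Set Int} {m : String}
    (h : (!(PySem.Set.contains used j) && isMaskOf m s) = false) :
    remP ((j, s) :: rest) used m = remP rest used m := by
  simp only [remP, List.filterMap_cons, h]
  simp

lemma remP_find_none (pairs : List (Int × String)) (used : PySem.Set Int) (key : String)
    (h : pairs.find? (fun p => !(PySem.Set.contains used p.1) && isMaskOf key p.2) = none) :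
    remP pairs used key = [] := by
  unfold remP
  rw [List.filterMap_eq_nil_iff]
  intro p hp
  have := List.find?_eq_none.mp h p hp
  simp at this ⊢
  tauto

-- A's inner scan returns exactly the head of the queue for `key`; marking its index as
-- used pops that head and leaves every other mask's queue unchanged.
lemma remP_find_some (key : String) :
    ∀ (pairs : List (Int × String)) (used : PySem.Set Int) (i : Int) (real : String),
    (pairs.map (·.1)).Nodup →
    pairs.find? (fun p => !(PySem.Set.contains used p.1) && isMaskOf key p.2) = some (i, real) →
    remP pairs used key = real :: remP pairs (PySem.Set.add used i) key ∧
      ∀ m, m ≠ key → remP pairs (PySem.Set.add used i) m = remP pairs used m := by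
  intro pairs
  induction pairs with
  | nil => intro used i real _ h; simp at h
  | cons q rest ih =>
    intro used i real hnd h
    obtain ⟨j, s⟩ := q
    have hnd' : (j :: rest.map (·.1)).Nodup := by simpa using hnd
    have hj : j ∉ rest.map (·.1) := (List.nodup_cons.mp hnd').1
    have hrest : (rest.map (·.1)).Nodup := (List.nodup_cons.mp hnd').2
    by_cases hp : (!(PySem.Set.contains used j) && isMaskOf key s) = true
    · rw [List.find?_cons_of_pos (p := fun p => !(PySem.Set.contains used p.1) && isMaskOf key p.2)
        (a := (j, s)) (l := rest) hp] at h
      have h' : (j, s) = (i, real) := by injection h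
      have h1 : i = j := ((Prod.mk.injEq _ _ _ _).mp h').1.symm
      have h2 : real = s := ((Prod.mk.injEq _ _ _ _).mp h').2.symm
      subst h1; subst h2
      have hcongr : ∀ m', remP rest (PySem.Set.add used i) m' = remP rest used m' := fun m' =>
        remP_congr _ _ _ _ (fun p hp' => contains_add_of_ne used
          (fun he => hj (he ▸ List.mem_map_of_mem hp')))
      have hmaskb : isMaskOf key real = true := by
        by_contra hx
        simp [eq_false_of_ne_true hx] at hp
      have hmask : maskKey real 4 = key := by simpa [isMaskOf] using hmaskb
      refine ⟨?_, ?_⟩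
      · rw [remP_cons_true hp, remP_cons_false (by simp), hcongr]
      · intro m hm
        have hms : isMaskOf m real = false := by
          show (maskKey real 4 == m) = false
          rw [hmask]
          exact beq_eq_false_iff_ne.mpr (fun he => hm he.symm)
        rw [remP_cons_false (by simp [hms]), remP_cons_false (by simp [hms]), hcongr]
    · rw [List.find?_cons_of_neg (p := fun p => !(PySem.Set.contains used p.1) && isMaskOf key p.2)
        (a := (j, s)) (l := rest) hp] at h
      have hfalse := eq_false_of_ne_true hp
      have hi : i ∈ rest.map (·.1) := List.mem_map_of_mem (List.mem_of_find?_eq_some h)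
      have hji : j ≠ i := fun he => hj (he ▸ hi)
      have hcj : PySem.Set.contains (PySem.Set.add used i) j = PySem.Set.contains used j :=
        contains_add_of_ne used hji
      obtain ⟨ih1, ih2⟩ := ih used i real hrest h
      refine ⟨?_, ?_⟩
      · rw [remP_cons_false hfalse, remP_cons_false (by rw [hcj]; exact hfalse)]
        exact ih1
      · intro m hm
        by_cases hc : (!(PySem.Set.contains used j) && isMaskOf m s) = true
        · rw [remP_cons_true hc, remP_cons_true (by rw [hcj]; exact hc), ih2 m hm]
        · have hc' := eq_false_of_ne_true hc
          rw [remP_cons_false hc', remP_cons_false (by rw [hcj]; exact hc'), ih2 m hm]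

lemma remP_empty (xs : List String) (m : String) :
    ∀ s : Int, remP (PySem.List.enumerate xs s) PySem.Set.empty m = xs.filter (fun r => isMaskOf m r) := by
  induction xs with
  | nil => intro s; simp [remP, PySem.List.enumerate]
  | cons x xs ih =>
    intro s
    rw [PySem.List.enumerate_cons]
    simp only [remP, List.filterMap_cons] at ih ⊢
    simp only [PySem.Set.contains_eq_listContains, List.contains_eq_mem]
    simp only [PySem.Set.empty, List.not_mem_nil, decide_false, Bool.not_false, Bool.true_and]
    have ihs := ih (s + 1)
    simp only [PySem.Set.contains_eq_listContains, List.contains_eq_mem, PySem.Set.empty,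
      List.not_mem_nil, decide_false, Bool.not_false, Bool.true_and] at ihs
    by_cases hx : isMaskOf m x
    · simp [hx, ihs]
    · simp [hx, ihs]

-- the queues dict built by B is exactly the per-mask queues of a fresh `used` set
lemma init_inv (existing : List String) (m : String) :
    (buildQueues existing).getD m [] = remP (PySem.List.enumerate existing) PySem.Set.empty m := by
  have h1 : buildQueues existing =
      (existing.map (fun r => (maskKey r 4, r))).foldl
        (fun d p => d.modify p.1 [] (fun q => q ++ [p.2])) PySem.Dict.empty := by
    rw [List.foldl_map]; rfl
  rw [h1, PySem.Dict.getD_foldl_modify_append]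
  have h2 := remP_empty existing m 0
  rw [show PySem.List.enumerate existing = PySem.List.enumerate existing 0 from rfl, h2]
  simp [List.filter_map, Function.comp_def, isMaskOf]

lemma get?_of_getD_cons (d : PySem.Dict String (List String)) (key : String)
    (r : String) (rs : List String) (h : d.getD key [] = r :: rs) :
    d.get? key = some (r :: rs) := by
  have hg := PySem.Dict.getD_eq_get?_getD d key []
  cases hq : d.get? key with
  | none => rw [hq] at hg; simp at hg; rw [hg] at h; exact absurd h (by simp)
  | some v => rw [hq] at hg; simp at hg; rw [hg] at h; rw [h]

-- main invariant transfer: if d's queues mirror the unused existing keys, both loops emit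
-- the same outputs step by step
lemma loop_eq (existing : List String) (inc : List String) :
    ∀ (acc : List String) (used : PySem.Set Int) (d : PySem.Dict String (List String)),
    (∀ m, d.getD m [] = remP (PySem.List.enumerate existing) used m) →
    (inc.foldl (resolveStepA existing) (acc, used)).1 = (inc.foldl resolveStepB (acc, d)).1 := by
  induction inc with
  | nil => intro acc used d _; rfl
  | cons key rest ih =>
    intro acc used d hinv
    rw [List.foldl_cons, List.foldl_cons]
    have hnodup : ((PySem.List.enumerate existing).map (·.1)).Nodup := by
      rw [PySem.List.map_fst_enumerate]
      exact PySem.List.nodup_pyRange_one _ _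
    cases hf : (PySem.List.enumerate existing).find?
        (fun p => !(PySem.Set.contains used p.1) && isMaskOf key p.2) with
    | none =>
      have hA : resolveStepA existing (acc, used) key = (acc ++ [key], used) := by
        unfold resolveStepA
        rw [hf]
      have hgd : d.getD key [] = [] := by
        rw [hinv key, remP_find_none _ _ _ hf]
      have hB : resolveStepB (acc, d) key = (acc ++ [key], d) := by
        unfold resolveStepB
        cases hq : d.get? key with
        | none => rfl
        | some v =>
          cases v with
          | nil => rfl
          | cons r rs =>
            exfalso
            have hg := PySem.Dict.getD_eq_get?_getD d key []
            rw [hq, hgd] at hg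
            simp at hg
      rw [hA, hB]
      exact ih (acc ++ [key]) used d hinv
    | some p =>
      obtain ⟨i, real⟩ := p
      obtain ⟨hk1, hk2⟩ := remP_find_some key (PySem.List.enumerate existing) used i real hnodup hf
      have hA : resolveStepA existing (acc, used) key = (acc ++ [real], PySem.Set.add used i) := by
        unfold resolveStepA
        rw [hf]
      have hget : d.get? key =
          some (real :: remP (PySem.List.enumerate existing) (PySem.Set.add used i) key) :=
        get?_of_getD_cons d key _ _ (by rw [hinv key, hk1])
      have hB : resolveStepB (acc, d) key =
          (acc ++ [real], d.insert key (remP (PySem.List.enumerate existing) (PySem.Set.add used i) key)) := by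
        unfold resolveStepB
        rw [hget]
      rw [hA, hB]
      apply ih
      intro m
      rw [PySem.Dict.getD_insert]
      by_cases hm : m = key
      · rw [if_pos hm, hm]
      · rw [if_neg hm, hinv m, hk2 m hm]

-- ===== VERDICT (by name: the statement is the Claim_ definition above) =====
theorem resolve_masked_api_keys_spec : Claim_equal_resolve_masked_api_keys := by
  intro incoming existing _
  unfold Spec_resolve_masked_api_keys resolve_masked_api_keys resolve_masked_api_keys_alt
  exact loop_eq existing incoming [] PySem.Set.empty (buildQueues existing)
    (fun m => init_inv existing m)
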